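-- pv_equiv track=rewrite | github.com/NishkaDG/cca2-mceliece | auxiliary.py | bitstring_to_positional
-- ===== SOURCE A (Python) =====
-- def bitstring_to_positional(bit_string):
--     delta_lst = []
--     ctr = 0
--     for ele in bit_string:
--         if int(ele) == 1:
--             delta_lst.append(ctr)
--             ctr = 0
--         else:
--             ctr = ctr + 1
--     return delta_lst
-- ===== SOURCE B (Python) =====
-- def bitstring_to_positional(bit_string):
--     positions = [i for i, e in enumerate(bit_string) if int(e) == 1]
--     return [p - q - 1 for p, q in zip(positions, [-1] + positions)]
-- ===== Notes on version B (the rewrite author's own statement) =====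
-- stated objective: alternative
-- what changed: B first builds the list of indices of 1-bits (enumerate + filter) and then computes the gaps by differencing consecutive positions with zip, instead of sweeping once with a running counter.
import Mathlib
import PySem

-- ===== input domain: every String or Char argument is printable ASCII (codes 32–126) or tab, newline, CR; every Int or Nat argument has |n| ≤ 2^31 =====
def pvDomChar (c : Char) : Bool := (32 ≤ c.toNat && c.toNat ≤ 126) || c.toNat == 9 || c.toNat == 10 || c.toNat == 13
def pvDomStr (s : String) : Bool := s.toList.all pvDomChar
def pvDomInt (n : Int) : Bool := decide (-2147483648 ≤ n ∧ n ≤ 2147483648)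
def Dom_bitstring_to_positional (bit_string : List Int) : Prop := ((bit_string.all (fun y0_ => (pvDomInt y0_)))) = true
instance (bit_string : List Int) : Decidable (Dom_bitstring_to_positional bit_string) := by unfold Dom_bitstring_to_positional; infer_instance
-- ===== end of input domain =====

-- B builds the index list of 1-bits first and then differences consecutive positions; an alternative decomposition, same cost.

-- ===== PORT A =====
-- one sweep with a running counter, as in the Python loop
def bitstring_to_positional (bit_string : List Int) : List Int :=
  (bit_string.foldl
    (fun (st : List Int × Int) ele =>
      if ele == 1 then (st.1 ++ [st.2], 0) else (st.1, st.2 + 1))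
    ([], 0)).1

-- ===== PORT B =====
-- positions of 1-bits via enumerate+filter, then a differencing pass via zip
def bitstring_to_positional_alt (bit_string : List Int) : List Int :=
  let positions : List Int :=
    ((PySem.List.enumerate bit_string 0).filter (fun p => p.2 == 1)).map (fun p => p.1)
  (positions.zip ((-1 : Int) :: positions)).map (fun pq => pq.1 - pq.2 - 1)

-- ===== PRECONDITION & SPEC =====
def Spec_bitstring_to_positional (bit_string : List Int) (out : List Int) : Prop := out = bitstring_to_positional_alt bit_string
instance (bit_string : List Int) (out : List Int) : Decidable (Spec_bitstring_to_positional bit_string out) := by unfold Spec_bitstring_to_positional; infer_instance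

-- ===== CLAIM (what is proved, stated in full; the proofs are below) =====
def Claim_equal_bitstring_to_positional : Prop := ∀ (bit_string : List Int), Dom_bitstring_to_positional bit_string → Spec_bitstring_to_positional bit_string (bitstring_to_positional bit_string)

-- ===== LEMMAS AND PROOFS =====

-- A's loop, recursively: remaining input and current counter
def pvAuxA : List Int → Int → List Int
  | [], _ => []
  | e :: xs, ctr => if e = 1 then ctr :: pvAuxA xs 0 else pvAuxA xs (ctr + 1)

-- B's differencing pass, recursively: positions and previous position
def pvGaps : List Int → Int → List Int
  | [], _ => []
  | p :: ps, prev => (p - prev - 1) :: pvGaps ps p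

theorem pvFoldlA (xs : List Int) (acc : List Int) (ctr : Int) :
    (xs.foldl
      (fun (st : List Int × Int) ele =>
        if ele == 1 then (st.1 ++ [st.2], 0) else (st.1, st.2 + 1))
      (acc, ctr)).1 = acc ++ pvAuxA xs ctr := by
  induction xs generalizing acc ctr with
  | nil => simp [pvAuxA]
  | cons e xs ih =>
    simp only [List.foldl_cons]
    by_cases h : (e == (1 : Int)) = true
    · rw [if_pos h, ih]
      simp [pvAuxA, show e = 1 from by simpa using h]
    · rw [if_neg h, ih]
      simp [pvAuxA, show ¬ e = 1 from by simpa using h]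

theorem pvZipGaps (ps : List Int) (prev : Int) :
    (ps.zip (prev :: ps)).map (fun pq => pq.1 - pq.2 - 1) = pvGaps ps prev := by
  induction ps generalizing prev with
  | nil => rfl
  | cons p ps ih => simp [pvGaps, ih]

theorem pvEnumFilter (e : Int) (xs : List Int) (s : Int) :
    ((PySem.List.enumerate (e :: xs) s).filter (fun p => p.2 == 1)).map (fun p => p.1)
      = (if e = 1 then [s] else [])
        ++ ((PySem.List.enumerate xs (s + 1)).filter (fun p => p.2 == 1)).map (fun p => p.1) := by
  rw [PySem.List.enumerate_cons]
  by_cases h : e = 1 <;> simp [h]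

theorem pvAuxA_gaps (xs : List Int) (ctr : Int) (s : Int) :
    pvAuxA xs ctr =
      pvGaps (((PySem.List.enumerate xs s).filter (fun p => p.2 == 1)).map (fun p => p.1))
        (s - ctr - 1) := by
  induction xs generalizing ctr s with
  | nil => simp [pvAuxA, PySem.List.enumerate_nil, pvGaps]
  | cons e xs ih =>
    rw [pvEnumFilter]
    by_cases h : e = 1
    · simp only [pvAuxA, h, reduceIte, List.cons_append, List.nil_append, pvGaps]
      rw [ih 0 (s + 1)]
      congr 1
      · omega
      · congr 1; omega
    · simp only [pvAuxA, h, List.nil_append, if_false]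
      rw [ih (ctr + 1) (s + 1)]
      congr 1; omega

-- ===== VERDICT (by name: the statement is the Claim_ definition above) =====
theorem bitstring_to_positional_spec : Claim_equal_bitstring_to_positional := by
  intro bs _
  unfold Spec_bitstring_to_positional bitstring_to_positional bitstring_to_positional_alt
  rw [pvFoldlA bs [] 0, List.nil_append, pvZipGaps, pvAuxA_gaps bs 0 0]
  norm_num
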